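-- pv_equiv track=rewrite | github.com/kuzand/nand2tetris | vm.py | basename
-- ===== SOURCE A (Python) =====
-- def basename(path):
--     bn = []
--     for i in range(len(path) - 1, -1, -1):
--         c = path[i]
--         if c == '/':
--             break
--         bn.append(c)
--
--     n = len(bn)
--     for i in range(n // 2):
--         tmp = bn[i]
--         bn[i] = bn[n - 1 - i]
--         bn[n - 1 - i] = tmp
--
--     return "".join(bn)
-- ===== SOURCE B (Python) =====
-- def basename(path):
--     return path[path.rfind('/') + 1:]
-- ===== Notes on version B (the rewrite author's own statement) =====
-- stated objective: idiomatic
-- what changed: Replaces the backward character-collecting loop and the manual in-place reversal with a single rfind for the last slash plus one slice (rfind returning -1 makes the slice start 0, returning the whole path).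
import Mathlib
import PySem

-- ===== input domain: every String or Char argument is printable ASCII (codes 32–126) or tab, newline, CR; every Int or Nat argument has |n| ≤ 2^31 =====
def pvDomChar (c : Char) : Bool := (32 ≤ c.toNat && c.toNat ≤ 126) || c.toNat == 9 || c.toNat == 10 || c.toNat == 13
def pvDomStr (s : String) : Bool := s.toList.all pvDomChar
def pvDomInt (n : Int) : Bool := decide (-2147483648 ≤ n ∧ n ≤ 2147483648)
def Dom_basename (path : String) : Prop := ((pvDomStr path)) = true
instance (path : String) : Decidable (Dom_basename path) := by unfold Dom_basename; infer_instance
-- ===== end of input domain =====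

-- B replaces A's backward collect-then-reverse loops by one rfind plus a slice; return value only.

-- ===== PORT A =====
-- the backward scan with break: iterates the descending index list, stops at '/'
def basenameGo : List Int → List Char → List Char → List Char
  | [], _, bn => bn
  | i :: rest, cs, bn =>
    let c := PySem.List.pyGetD cs i ' '
    if c = '/' then bn else basenameGo rest cs (bn ++ [c])

-- one iteration of A's in-place reversal loop (tmp-swap of positions i and n-1-i)
def basenameSwap (n : Int) (b : List Char) (i : Int) : List Char :=
  let tmp := PySem.List.pyGetD b i ' '
  let b' := PySem.List.pySetD b i (PySem.List.pyGetD b (n - 1 - i) ' ')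
  PySem.List.pySetD b' (n - 1 - i) tmp

def basename (path : String) : String :=
  let cs := path.toList
  let bn := basenameGo (PySem.List.pyRange ((cs.length : Int) - 1) (-1) (-1)) cs []
  let n : Int := (bn.length : Int)
  let bn2 := (PySem.List.pyRange 0 (PySem.Int.floordiv n 2) 1).foldl (basenameSwap n) bn
  String.ofList bn2

-- ===== PORT B =====
-- exact port of str.rfind for a single-character needle: highest index of c in cs, -1 if absent
def pyRfindChar (cs : List Char) (c : Char) : Int :=
  match cs.reverse.findIdx? (· == c) with
  | none => -1
  | some j => (cs.length : Int) - 1 - (j : Int)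

def basename_alt (path : String) : String :=
  let idx := pyRfindChar path.toList '/'
  String.ofList (PySem.List.slice path.toList (some (idx + 1)) none)

-- ===== PRECONDITION & SPEC =====
def Spec_basename (path : String) (out : String) : Prop := out = basename_alt path
instance (path : String) (out : String) : Decidable (Spec_basename path out) := by unfold Spec_basename; infer_instance

-- ===== CLAIM (what is proved, stated in full; the proofs are below) =====
def Claim_equal_basename : Prop := ∀ (path : String), Dom_basename path → Spec_basename path (basename path)

-- ===== LEMMAS AND PROOFS =====

lemma basenameGo_append (idxs : List Int) (ds : List Char) (c : Char) (bn : List Char)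
    (h : ∀ i ∈ idxs, 0 ≤ i ∧ i < (ds.length : Int)) :
    basenameGo idxs (ds ++ [c]) bn = basenameGo idxs ds bn := by
  induction idxs generalizing bn with
  | nil => rfl
  | cons i rest ih =>
    obtain ⟨h0, h1⟩ := h i (by simp)
    have hget : PySem.List.pyGetD (ds ++ [c]) i ' ' = PySem.List.pyGetD ds i ' ' := by
      rw [PySem.List.pyGetD_eq_getElem (ds ++ [c]) ' ' h0 (by simp; omega),
          PySem.List.pyGetD_eq_getElem ds ' ' h0 h1,
          List.getElem_append_left (by omega)]
    simp only [basenameGo, hget]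
    split
    · rfl
    · exact ih _ (fun i hi => h i (List.mem_cons_of_mem _ hi))

lemma basenameGo_spec (cs : List Char) (bn : List Char) :
    basenameGo (PySem.List.pyRange ((cs.length : Int) - 1) (-1) (-1)) cs bn
      = bn ++ cs.reverse.takeWhile (fun c => !(c == '/')) := by
  induction cs using List.reverseRecOn generalizing bn with
  | nil => simp [PySem.List.pyRange_neg_one_eq_nil]; rfl
  | append_singleton ds c ih =>
    have hlen : ((ds ++ [c]).length : Int) - 1 = (ds.length : Int) := by simp
    rw [hlen, PySem.List.pyRange_neg_one_cons (by omega)]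
    have hget : PySem.List.pyGetD (ds ++ [c]) (ds.length : Int) ' ' = c := by
      rw [PySem.List.pyGetD_natCast]
      simp [List.getD_eq_getElem?_getD]
    simp only [basenameGo, hget, List.reverse_append, List.reverse_singleton,
      List.singleton_append, List.takeWhile_cons]
    by_cases hc : c = '/'
    · simp [hc]
    · have hne : (c == '/') = false := by simp [hc]
      rw [if_neg hc, hne]
      rw [basenameGo_append _ ds c _ (by
        intro i hi
        rw [PySem.List.mem_pyRange_neg_one] at hi
        omega)]
      rw [ih (bn ++ [c])]
      simp

def swapN (n : Nat) (b : List Char) (i : Nat) : List Char :=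
  (b.set i (b.getD (n - 1 - i) ' ')).set (n - 1 - i) (b.getD i ' ')

lemma length_swapN (n : Nat) (b : List Char) (i : Nat) : (swapN n b i).length = b.length := by
  simp [swapN]

lemma length_foldl_swapN (k n : Nat) (b : List Char) :
    ((List.range k).foldl (swapN n) b).length = b.length := by
  induction k generalizing b with
  | zero => rfl
  | succ k ih => rw [List.range_succ, List.foldl_append, List.foldl_cons, List.foldl_nil,
      length_swapN, ih]

lemma basenameSwap_eq_swapN (n : Nat) (b : List Char) (i : Nat) (hi : i < n) (hb : b.length = n) :
    basenameSwap (n : Int) b (i : Int) = swapN n b i := by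
  have hcast : (n : Int) - 1 - (i : Int) = ((n - 1 - i : Nat) : Int) := by omega
  simp only [basenameSwap, swapN, hcast, PySem.List.pyGetD_natCast, PySem.List.pySetD_natCast]

lemma foldSwap_bridge (k n : Nat) (b : List Char) (hb : b.length = n) (hk : k ≤ n) :
    (PySem.List.pyRange 0 (k : Int) 1).foldl (basenameSwap (n : Int)) b
      = (List.range k).foldl (swapN n) b := by
  induction k generalizing b with
  | zero => rfl
  | succ k ih =>
    have h1 : ((k + 1 : Nat) : Int) = (k : Int) + 1 := by push_cast; ring
    rw [h1, PySem.List.pyRange_one_succ_right (by omega), List.foldl_append,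
        List.range_succ, List.foldl_append, ih b hb (by omega),
        List.foldl_cons, List.foldl_nil, List.foldl_cons, List.foldl_nil,
        basenameSwap_eq_swapN n _ k (by omega) (by rw [length_foldl_swapN, hb])]

lemma set_mid (ws : List Char) (x y v : Char) (j : Nat) (hj : j < ws.length) :
    (y :: ws ++ [x]).set (j + 1) v = y :: ws.set j v ++ [x] := by
  rw [List.set_append, if_pos (by simp; omega), List.set_cons_succ]

lemma getD_mid (ws : List Char) (x y : Char) (j : Nat) (hj : j < ws.length) :
    (y :: ws ++ [x]).getD (j + 1) ' ' = ws.getD j ' ' := by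
  rw [List.getD_eq_getElem _ _ (by simp; omega), List.getD_eq_getElem _ _ hj,
      List.getElem_append_left (by simp; omega), List.getElem_cons_succ]

lemma swapN_ends (ms : List Char) (x y : Char) :
    swapN (ms.length + 2) (x :: ms ++ [y]) 0 = y :: ms ++ [x] := by
  have h1 : ms.length + 2 - 1 - 0 = ms.length + 1 := by omega
  have hg : (x :: ms ++ [y]).getD (ms.length + 1) ' ' = y := by
    rw [List.getD_eq_getElem _ _ (by simp), List.getElem_append_right (by simp)]
    simp
  have hg0 : (x :: ms ++ [y]).getD 0 ' ' = x := by
    rw [List.getD_append _ _ _ _ (by simp), List.getD_cons_zero]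
  simp only [swapN, h1, hg, hg0]
  rw [List.set_append, if_pos (by simp), List.set_cons_zero,
      List.set_append, if_neg (by simp)]
  simp

lemma swapN_shift (zs : List Char) (x y : Char) (i : Nat) (hi : i < zs.length) :
    swapN (zs.length + 2) (y :: zs ++ [x]) (i + 1) = y :: swapN zs.length zs i ++ [x] := by
  have h1 : zs.length + 2 - 1 - (i + 1) = (zs.length - 1 - i) + 1 := by omega
  have hlt : zs.length - 1 - i < zs.length := by omega
  simp only [swapN, h1, getD_mid zs x y i hi, getD_mid zs x y _ hlt,
    set_mid zs x y _ i hi]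
  rw [set_mid _ x y _ (zs.length - 1 - i) (by simp [hlt])]

lemma fold_shift (k : Nat) (zs : List Char) (x y : Char) (hk : k ≤ zs.length) :
    (List.range k).foldl (fun b i => swapN (zs.length + 2) b (i + 1)) (y :: zs ++ [x])
      = y :: (List.range k).foldl (swapN zs.length) zs ++ [x] := by
  induction k with
  | zero => rfl
  | succ k ih =>
    have hZ : ((List.range k).foldl (swapN zs.length) zs).length = zs.length :=
      length_foldl_swapN k zs.length zs
    rw [List.range_succ, List.foldl_append, List.foldl_cons, List.foldl_nil,
        List.foldl_append, List.foldl_cons, List.foldl_nil, ih (by omega)]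
    have := swapN_shift ((List.range k).foldl (swapN zs.length) zs) x y k (by omega)
    rw [hZ] at this
    exact this

lemma swap_rev (m : Nat) : ∀ b : List Char, b.length = m →
    (List.range (m / 2)).foldl (swapN m) b = b.reverse := by
  induction m using Nat.strong_induction_on with
  | _ m ih =>
    intro b hb
    match b with
    | [] => subst hb; rfl
    | [x] =>
      simp at hb
      subst hb
      rfl
    | x :: (t :: ts) =>
      obtain ⟨ms, y, hty⟩ := (t :: ts).eq_nil_or_concat.resolve_left (by simp)
      rw [hty, List.concat_eq_append] at hb ⊢
      have hm : m = ms.length + 2 := by simp at hb; omega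
      subst hm
      have hdiv : (ms.length + 2) / 2 = ms.length / 2 + 1 := by omega
      rw [hdiv, List.range_succ_eq_map, List.foldl_cons, ← List.cons_append]
      have hends : swapN (ms.length + 2) (x :: ms ++ [y]) 0 = y :: ms ++ [x] :=
        swapN_ends ms x y
      rw [hends, List.foldl_map]
      have : (List.range (ms.length / 2)).foldl
          (fun b i => swapN (ms.length + 2) b (i.succ)) (y :: ms ++ [x])
          = y :: (List.range (ms.length / 2)).foldl (swapN ms.length) ms ++ [x] :=
        fold_shift (ms.length / 2) ms x y (by omega)
      rw [this, ih ms.length (by omega) ms rfl]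
      simp

lemma takeWhile_eq_take_of_findIdx? {α : Type} (q : α → Bool) (l : List α) (j : Nat)
    (h : l.findIdx? q = some j) : l.takeWhile (fun a => !(q a)) = l.take j := by
  induction l generalizing j with
  | nil => simp at h
  | cons a l ih =>
    rw [List.findIdx?_cons] at h
    by_cases hq : q a
    · simp [hq] at h
      subst h
      simp [hq]
    · simp [hq] at h
      obtain ⟨j', hj', rfl⟩ := h
      simp [hq, ih j' hj']

lemma floordiv_two_natCast (a : Nat) :
    PySem.Int.floordiv (a : Int) 2 = ((a / 2 : Nat) : Int) := by
  simp [PySem.Int.floordiv, Int.fdiv_eq_ediv]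

theorem basename_eq (path : String) : basename path = basename_alt path := by
  simp only [basename, basename_alt]
  set cs := path.toList with hcs
  rw [basenameGo_spec cs [], List.nil_append]
  set tw := cs.reverse.takeWhile (fun c => !(c == '/')) with htw
  rw [floordiv_two_natCast, foldSwap_bridge (tw.length / 2) tw.length tw rfl (by omega),
      swap_rev tw.length tw rfl]
  cases h : cs.reverse.findIdx? (· == '/') with
  | none =>
    have hall : ∀ x ∈ cs.reverse, (x == '/') = false := List.findIdx?_eq_none_iff.mp h
    have : tw = cs.reverse := by
      rw [htw, List.takeWhile_eq_self_iff.mpr (fun x hx => by simp [hall x hx])]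
    rw [this, List.reverse_reverse, pyRfindChar, h]
    norm_num
  | some j =>
    have hj : j < cs.length := by
      have := (List.findIdx?_eq_some_iff_findIdx_eq.mp h).1
      simpa using this
    have htake : tw = cs.reverse.take j := takeWhile_eq_take_of_findIdx? _ _ j h
    rw [htake, pyRfindChar, h]
    have hidx : (cs.length : Int) - 1 - (j : Int) + 1 = ((cs.length - j : Nat) : Int) := by
      omega
    rw [hidx, PySem.List.slice_from_natCast, List.reverse_take]
    simp

-- ===== VERDICT (by name: the statement is the Claim_ definition above) =====
theorem basename_spec : Claim_equal_basename := by
  intro path _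
  show basename path = basename_alt path
  exact basename_eq path
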